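-- pv_equiv track=rewrite | github.com/LinDA-tools/transformation | views.py | getTableCounter
-- ===== SOURCE A (Python) =====
-- def getTableCounter(jsonmodel, target_table):
--     tables = jsonmodel["tables"]
--     table_counter = 1
--     for table in tables:
--         if table["selected"] == 'true':
--             if table["name"] == target_table:
--                 return str(table_counter)
--             table_counter += 1
--     return str(table_counter)
-- ===== SOURCE B (Python) =====
-- def getTableCounter(jsonmodel, target_table):
--     pos = {}
--     n = 0
--     for table in jsonmodel["tables"]:
--         if table["selected"] == 'true':
--             n += 1
--             pos.setdefault(table["name"], n)
--     return str(pos.get(target_table, n + 1))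
-- ===== Notes on version B (the rewrite author's own statement) =====
-- stated objective: alternative
-- what changed: Instead of A's fused matching loop with early return, B makes one full pass building a first-occurrence hash index (name -> 1-based position among selected tables) with dict.setdefault, then answers by a single dict lookup with default total+1.
import Mathlib
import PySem

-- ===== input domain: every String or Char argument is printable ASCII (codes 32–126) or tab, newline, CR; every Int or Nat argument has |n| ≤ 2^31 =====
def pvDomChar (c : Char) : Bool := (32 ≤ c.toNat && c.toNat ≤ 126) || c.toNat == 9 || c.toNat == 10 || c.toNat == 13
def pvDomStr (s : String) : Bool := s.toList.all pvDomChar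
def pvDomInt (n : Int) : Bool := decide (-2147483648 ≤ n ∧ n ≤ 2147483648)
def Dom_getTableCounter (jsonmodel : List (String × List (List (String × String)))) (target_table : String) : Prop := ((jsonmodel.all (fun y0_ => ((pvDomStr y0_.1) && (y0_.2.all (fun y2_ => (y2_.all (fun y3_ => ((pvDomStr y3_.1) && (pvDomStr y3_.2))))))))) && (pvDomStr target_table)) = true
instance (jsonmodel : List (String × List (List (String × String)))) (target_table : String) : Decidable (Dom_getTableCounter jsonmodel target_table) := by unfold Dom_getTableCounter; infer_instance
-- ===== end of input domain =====

-- B replaces A's fused matching loop (with early return) by one full pass that builds a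
-- first-occurrence index dict (name -> 1-based position among selected tables) via
-- setdefault, answered by a single dict lookup; objective: alternative algorithm.

-- dict lookup on an association list: first match (exact Python dict semantics under the
-- List (K × V) convention)
def pvLookup? {α : Type} : List (String × α) → String → Option α
  | [], _ => none
  | (k, v) :: rest, key => if k = key then some v else pvLookup? rest key

-- ===== PORT A =====
-- the loop of A: table_counter is the Int accumulator; KeyError (missing key) → "" , excluded by Pre_
def pvGoA (target : String) : List (List (String × String)) → Int → String
  | [], c => PySem.Int.toStr c
  | t :: ts, c =>
    match pvLookup? t "selected" with
    | none => ""          -- table["selected"] raises KeyError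
    | some s =>
      if s = "true" then
        match pvLookup? t "name" with
        | none => ""      -- table["name"] raises KeyError
        | some n => if n = target then PySem.Int.toStr c else pvGoA target ts (c + 1)
      else pvGoA target ts c

def getTableCounter (jsonmodel : List (String × List (List (String × String)))) (target_table : String) : String :=
  match pvLookup? jsonmodel "tables" with
  | none => ""            -- jsonmodel["tables"] raises KeyError
  | some tables => pvGoA target_table tables 1

-- ===== PORT B =====
-- one loop iteration of B: state is (pos dict, running count n)
def pvStepB (acc : PySem.Dict String Int × Int) (t : List (String × String)) : PySem.Dict String Int × Int :=
  match pvLookup? t "selected" with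
  | none => acc           -- table["selected"] raises KeyError (excluded by Pre_)
  | some s =>
    if s = "true" then
      match pvLookup? t "name" with
      | none => (acc.1, acc.2 + 1)   -- table["name"] raises KeyError (excluded by Pre_)
      | some nm => (acc.1.setdefault nm (acc.2 + 1), acc.2 + 1)
    else acc

def getTableCounter_alt (jsonmodel : List (String × List (List (String × String)))) (target_table : String) : String :=
  match pvLookup? jsonmodel "tables" with
  | none => ""            -- jsonmodel["tables"] raises KeyError
  | some tables =>
    let st := tables.foldl pvStepB (PySem.Dict.empty, 0)
    PySem.Int.toStr (st.1.getD target_table (st.2 + 1))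

-- ===== PRECONDITION & SPEC =====
-- Pre_ excludes the inputs on which either program raises KeyError: jsonmodel without a
-- "tables" key, a table without a "selected" key, or a selected table without a "name"
-- key (on tables after an early match A can still RETURN while B, scanning everything,
-- raises — those inputs are excluded and cited in the claim).
def Pre_getTableCounter (jsonmodel : List (String × List (List (String × String)))) (target_table : String) : Prop :=
  "tables" ∈ jsonmodel.map Prod.fst ∧
  ∀ t ∈ (jsonmodel.lookup "tables").getD [],
    "selected" ∈ t.map Prod.fst ∧
    (t.lookup "selected" = some "true" → "name" ∈ t.map Prod.fst)
instance (jsonmodel : List (String × List (List (String × String)))) (target_table : String) : Decidable (Pre_getTableCounter jsonmodel target_table) := by unfold Pre_getTableCounter; infer_instance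

def pvWitness_getTableCounter : (List (String × List (List (String × String)))) × String :=
  ([("tables", [[("selected", "true"), ("name", "a")], [("selected", "false")]])], "a")

def Spec_getTableCounter (jsonmodel : List (String × List (List (String × String)))) (target_table : String) (out : String) : Prop := out = getTableCounter_alt jsonmodel target_table
instance (jsonmodel : List (String × List (List (String × String)))) (target_table : String) (out : String) : Decidable (Spec_getTableCounter jsonmodel target_table out) := by unfold Spec_getTableCounter; infer_instance

-- ===== CLAIM (what is proved, stated in full; the proofs are below) =====
def Claim_equal_getTableCounter : Prop := ∀ (jsonmodel : List (String × List (List (String × String)))) (target_table : String), Dom_getTableCounter jsonmodel target_table → Pre_getTableCounter jsonmodel target_table → Spec_getTableCounter jsonmodel target_table (getTableCounter jsonmodel target_table)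

-- ===== LEMMAS AND PROOFS =====

-- the assoc-list lookup of the ports is the standard-library first-match lookup
theorem pvLookup?_eq_lookup {α : Type} (d : List (String × α)) (k : String) :
    pvLookup? d k = d.lookup k := by
  induction d with
  | nil => rfl
  | cons p rest ih =>
    obtain ⟨a, b⟩ := p
    by_cases h : a = k
    · subst h; simp [pvLookup?, List.lookup]
    · have hb : (k == a) = false := by simp [Ne.symm h]
      simp [pvLookup?, List.lookup, h, hb, ih]

theorem pvLookup?_isSome_iff {α : Type} (d : List (String × α)) (k : String) :
    (pvLookup? d k).isSome = true ↔ k ∈ d.map Prod.fst := by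
  induction d with
  | nil => simp [pvLookup?]
  | cons p rest ih =>
    obtain ⟨a, b⟩ := p
    by_cases h : a = k
    · subst h; simp [pvLookup?]
    · simp [pvLookup?, h, Ne.symm h, ih]

-- once the target has an entry, B's loop never changes it (setdefault only adds fresh keys)
theorem foldl_pvStepB_preserves (target : String) (v : Int)
    (ts : List (List (String × String))) :
    ∀ acc : PySem.Dict String Int × Int, acc.1.get? target = some v →
      (ts.foldl pvStepB acc).1.get? target = some v := by
  induction ts with
  | nil => intro acc h; simpa using h
  | cons t ts ih =>
    intro acc h
    rw [List.foldl_cons]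
    apply ih
    cases hs : pvLookup? t "selected" with
    | none => simpa [pvStepB, hs] using h
    | some s =>
      by_cases htrue : s = "true"
      · subst htrue
        cases hnm : pvLookup? t "name" with
        | none => simpa [pvStepB, hs, hnm] using h
        | some nm =>
          have hstep : pvStepB acc t = (acc.1.setdefault nm (acc.2 + 1), acc.2 + 1) := by
            simp [pvStepB, hs, hnm]
          rw [hstep]
          cases hc : acc.1.contains nm with
          | true => rw [PySem.Dict.setdefault_of_contains _ _ hc]; exact h
          | false =>
            have hne : target ≠ nm := by
              intro he; subst he
              rw [PySem.Dict.contains_eq_isSome_get?, h] at hc; simp at hc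
            rw [PySem.Dict.setdefault_of_not_contains _ _ hc]
            rw [PySem.Dict.get?_insert_of_ne _ _ hne]; exact h
      · simpa [pvStepB, hs, htrue] using h

-- core invariant: A's loop from counter n+1, with the target not yet indexed, computes
-- B's "first-occurrence lookup with default total+1" view
theorem pvGoA_eq (target : String) (ts : List (List (String × String)))
    (h : ∀ t ∈ ts, (pvLookup? t "selected").isSome = true ∧
        (pvLookup? t "selected" = some "true" → (pvLookup? t "name").isSome = true)) :
    ∀ (d : PySem.Dict String Int) (n : Int), d.get? target = none →
      pvGoA target ts (n + 1) =
        PySem.Int.toStr ((ts.foldl pvStepB (d, n)).1.getD target ((ts.foldl pvStepB (d, n)).2 + 1)) := by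
  induction ts with
  | nil =>
    intro d n hd
    simp [pvGoA, PySem.Dict.getD_eq_get?_getD, hd]
  | cons t ts ih =>
    intro d n hd
    obtain ⟨hsel, hname⟩ := h t (by simp)
    have hts : ∀ t' ∈ ts, (pvLookup? t' "selected").isSome = true ∧
        (pvLookup? t' "selected" = some "true" → (pvLookup? t' "name").isSome = true) :=
      fun t' ht' => h t' (by simp [ht'])
    cases hs : pvLookup? t "selected" with
    | none => simp [hs] at hsel
    | some s =>
      by_cases htrue : s = "true"
      · subst htrue
        have hn : (pvLookup? t "name").isSome = true := hname hs
        cases hnm : pvLookup? t "name" with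
        | none => simp [hnm] at hn
        | some nm =>
          have hstep : pvStepB (d, n) t = (d.setdefault nm (n + 1), n + 1) := by
            simp [pvStepB, hs, hnm]
          by_cases hmatch : nm = target
          · subst hmatch
            have hcA : pvGoA nm (t :: ts) (n + 1) = PySem.Int.toStr (n + 1) := by
              simp [pvGoA, hs, hnm]
            have hc : d.contains nm = false := by
              rw [PySem.Dict.contains_eq_isSome_get?, hd]; rfl
            have hset : (d.setdefault nm (n + 1)).get? nm = some (n + 1) := by
              rw [PySem.Dict.setdefault_of_not_contains _ _ hc,
                PySem.Dict.get?_insert_self]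
            have hfinal : ((ts.foldl pvStepB (d.setdefault nm (n + 1), n + 1)).1).get? nm
                = some (n + 1) :=
              foldl_pvStepB_preserves nm (n + 1) ts _ hset
            rw [hcA, List.foldl_cons, hstep,
              PySem.Dict.getD_eq_get?_getD, hfinal]
            rfl
          · have hcA : pvGoA target (t :: ts) (n + 1) = pvGoA target ts (n + 1 + 1) := by
              simp [pvGoA, hs, hnm, hmatch]
            have hd' : (d.setdefault nm (n + 1)).get? target = none := by
              cases hc : d.contains nm with
              | true => rw [PySem.Dict.setdefault_of_contains _ _ hc]; exact hd
              | false =>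
                rw [PySem.Dict.setdefault_of_not_contains _ _ hc,
                  PySem.Dict.get?_insert_of_ne _ _ (Ne.symm hmatch)]
                exact hd
            rw [hcA, List.foldl_cons, hstep, ih hts (d.setdefault nm (n + 1)) (n + 1) hd']
      · have hcA : pvGoA target (t :: ts) (n + 1) = pvGoA target ts (n + 1) := by
          simp [pvGoA, hs, htrue]
        have hstep : pvStepB (d, n) t = (d, n) := by
          simp [pvStepB, hs, htrue]
        rw [hcA, List.foldl_cons, hstep, ih hts d n hd]

-- ===== VERDICT (by name: the statement is the Claim_ definition above) =====
theorem getTableCounter_spec : Claim_equal_getTableCounter := by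
  intro jm target _ hpre
  obtain ⟨hsome, hts⟩ := hpre
  rw [← pvLookup?_isSome_iff] at hsome
  unfold Spec_getTableCounter getTableCounter getTableCounter_alt
  cases htab : pvLookup? jm "tables" with
  | none => simp [htab] at hsome
  | some tables =>
    have htab' : jm.lookup "tables" = some tables := by rw [← pvLookup?_eq_lookup, htab]
    have hcond : ∀ t ∈ tables, (pvLookup? t "selected").isSome = true ∧
        (pvLookup? t "selected" = some "true" → (pvLookup? t "name").isSome = true) := by
      intro t ht
      obtain ⟨h1, h2⟩ := hts t (by simp [htab', ht])
      rw [← pvLookup?_isSome_iff] at h1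
      refine ⟨h1, fun heq => ?_⟩
      rw [pvLookup?_isSome_iff]
      exact h2 (by rw [← pvLookup?_eq_lookup]; exact heq)
    have h := pvGoA_eq target tables hcond PySem.Dict.empty 0 (by simp)
    simpa using h
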